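-- pv_equiv track=rewrite | github.com/fiddleatwork/interviewpractice | src/test/python/coding/misc/chain_of_strings_test.py | check_chain
-- ===== SOURCE A (Python) =====
-- def check_chain(
--         first_char: str,
--         last_char: str,
--         remaining: list[str],
-- ) -> bool:
--     if not remaining:
--         return last_char == first_char
--     starts_with = [word for word in remaining if word[0] == last_char]
--     for word in starts_with:
--         if check_chain(first_char, word[-1], [c for c in remaining if c != word]):
--             return True
--     return False
-- ===== SOURCE B (Python) =====
-- def check_chain(first_char, last_char, remaining):
--     # Layered breadth-first search over deduplicated (current_char, remaining_set)
--     # states: each layer is the exact set of states reachable after using k distinct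
--     # words, so duplicate search states collapse instead of being re-explored.
--     words = frozenset(remaining)
--     frontier = {(last_char, words)}
--     for _ in range(len(words)):
--         frontier = {
--             (w[-1], s - {w})
--             for (c, s) in frontier
--             for w in s
--             if w[0] == c
--         }
--     return any(c == first_char for (c, s) in frontier)
-- ===== Notes on version B (the rewrite author's own statement) =====
-- stated objective: alternative
-- what changed: B replaces A's recursive backtracking (which re-explores the same (current char, remaining words) configuration factorially many times) with a layered breadth-first search: it dedupes the words once and iteratively computes, as a set, the exact frontier of reachable (current_char, remaining_set) states after k words, so equal states collapse and the search runs over at most 2^d set-states instead of d! orderings.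
import Mathlib
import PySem

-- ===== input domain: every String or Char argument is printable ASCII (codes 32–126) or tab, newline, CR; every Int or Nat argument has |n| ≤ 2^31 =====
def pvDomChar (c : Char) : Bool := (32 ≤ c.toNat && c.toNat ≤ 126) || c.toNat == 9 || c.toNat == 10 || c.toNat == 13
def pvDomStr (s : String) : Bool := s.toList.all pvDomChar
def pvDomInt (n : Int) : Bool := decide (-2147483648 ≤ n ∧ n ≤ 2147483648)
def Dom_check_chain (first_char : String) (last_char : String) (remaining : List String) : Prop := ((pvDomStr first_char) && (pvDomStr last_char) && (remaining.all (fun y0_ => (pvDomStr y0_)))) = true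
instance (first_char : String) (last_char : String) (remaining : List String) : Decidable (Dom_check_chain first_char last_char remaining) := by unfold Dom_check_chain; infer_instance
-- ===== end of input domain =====

-- B replaces A's recursive backtracking with a layered breadth-first search over
-- deduplicated (current_char, remaining_set) states, collapsing equal search states
-- per layer; alternative algorithm, same return value.

-- word[0] as a 1-character Python string (used by both ports; "" only for the empty word, excluded by Pre_)
def pvHead (w : String) : String := ((PySem.Str.pyGet? w 0).map (fun c => String.ofList [c])).getD ""
-- word[-1] as a 1-character Python string
def pvLast (w : String) : String := ((PySem.Str.pyGet? w (-1)).map (fun c => String.ofList [c])).getD ""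

-- ===== PORT A =====
def check_chain (first_char : String) (last_char : String) (remaining : List String) : Bool :=
  if remaining = [] then last_char == first_char
  else
    (remaining.filter (fun w => pvHead w == last_char)).attach.any (fun ⟨w, hw⟩ =>
      check_chain first_char (pvLast w) (remaining.filter (fun c => c ≠ w)))
termination_by remaining.length
decreasing_by
  have hwr : w ∈ remaining := List.mem_of_mem_filter hw
  simp only [List.length_unattach]
  refine lt_of_lt_of_le ((List.length_filter_lt_length_iff_exists (l := remaining.attach)).mpr ⟨⟨w, hwr⟩, List.mem_attach _ _, ?_⟩) ?_
  · simp
  · simp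

-- ===== PORT B =====
-- one layer of Source B's set comprehension; every state set is a membership-filtered
-- sublist of the initial deduped word list, so that list filtering is exactly the
-- frozenset difference s - {w} in canonical form, and PySem.Set.ofList is the
-- set-comprehension dedup of the produced states.
def pvStep (fr : List (String × List String)) : List (String × List String) :=
  PySem.Set.ofList (fr.flatMap (fun p =>
    (p.2.filter (fun w => pvHead w == p.1)).map (fun w => (pvLast w, p.2.filter (fun x => x ≠ w)))))

def check_chain_alt (first_char : String) (last_char : String) (remaining : List String) : Bool :=
  let words := PySem.Set.ofList remaining
  ((List.range words.length).foldl (fun fr _ => pvStep fr) [(last_char, words)]).any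
    (fun p => p.1 == first_char)

-- ===== PRECONDITION & SPEC =====
-- Pre_ excludes exactly the inputs on which the Python A raises IndexError: an empty word
-- in `remaining` (word[0] is evaluated for every word of the list; B raises there too).
def Pre_check_chain (first_char : String) (last_char : String) (remaining : List String) : Prop :=
  "" ∉ remaining
instance (first_char : String) (last_char : String) (remaining : List String) : Decidable (Pre_check_chain first_char last_char remaining) := by unfold Pre_check_chain; infer_instance

def pvWitness_check_chain : String × String × List String := ("c", "a", ["ab", "bc"])

def Spec_check_chain (first_char : String) (last_char : String) (remaining : List String) (out : Bool) : Prop := out = check_chain_alt first_char last_char remaining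
instance (first_char : String) (last_char : String) (remaining : List String) (out : Bool) : Decidable (Spec_check_chain first_char last_char remaining out) := by unfold Spec_check_chain; infer_instance

-- ===== CLAIM (what is proved, stated in full; the proofs are below) =====
def Claim_equal_check_chain : Prop := ∀ (first_char : String) (last_char : String) (remaining : List String), Dom_check_chain first_char last_char remaining → Pre_check_chain first_char last_char remaining → Spec_check_chain first_char last_char remaining (check_chain first_char last_char remaining)

-- ===== LEMMAS AND PROOFS =====

-- the words of s, consumed in order starting at position `last`, chain up and end at `first`
def pvChains (first : String) : String → List String → Prop
  | last, [] => last = first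
  | last, w :: ws => pvHead w = last ∧ pvChains first (pvLast w) ws

-- common specification: some duplicate-free arrangement of the members of r chains from last to first
def pvSpecSet (first last : String) (r : List String) : Prop :=
  ∃ s : List String, s.Nodup ∧ (∀ x, x ∈ s ↔ x ∈ r) ∧ pvChains first last s

lemma pvChains_snoc (f l w : String) (s : List String) :
    pvChains f l (s ++ [w]) ↔ pvChains (pvHead w) l s ∧ pvLast w = f := by
  induction s generalizing l with
  | nil => simp [pvChains]; tauto
  | cons v vs ih => simp [pvChains, ih]; tauto

lemma pv_card_filter_ne_lt {r : List String} {w : String} (hw : w ∈ r) :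
    (r.filter (fun c => c ≠ w)).toFinset.card < r.toFinset.card := by
  apply Finset.card_lt_card
  constructor
  · intro x hx
    simp only [List.mem_toFinset, List.mem_filter] at hx ⊢
    exact hx.1
  · intro hsub
    have hw' := hsub (by simpa using hw)
    simp at hw'

lemma pv_checkA_unfold_ne (f l : String) (r : List String) (h : r ≠ []) :
    check_chain f l r = true ↔
      ∃ w, (w ∈ r ∧ pvHead w = l) ∧
        check_chain f (pvLast w) (r.filter (fun c => c ≠ w)) = true := by
  rw [check_chain]
  simp [h, List.any_eq_true, List.mem_filter, and_assoc]
  tauto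

lemma pv_A_iff : ∀ (n : Nat) (r : List String), r.toFinset.card ≤ n →
    ∀ f l, (check_chain f l r = true ↔ pvSpecSet f l r) := by
  intro n
  induction n with
  | zero =>
    intro r hc f l
    have hr : r = [] := by
      have : r.toFinset = ∅ := Finset.card_eq_zero.mp (Nat.le_zero.mp hc)
      simpa [List.toFinset_eq_empty_iff] using this
    subst hr
    rw [check_chain]
    constructor
    · intro hb
      exact ⟨[], by simp, by simp, by simpa [pvChains] using (beq_iff_eq.mp (by simpa using hb))⟩
    · rintro ⟨s, _, hmem, hch⟩
      have hs : s = [] := by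
        cases s with
        | nil => rfl
        | cons a as => exact absurd ((hmem a).mp (by simp)) (by simp)
      subst hs
      simpa using beq_iff_eq.mpr hch
  | succ n ih =>
    intro r hc f l
    by_cases hr : r = []
    · subst hr
      rw [check_chain]
      constructor
      · intro hb
        exact ⟨[], by simp, by simp, by simpa [pvChains] using (beq_iff_eq.mp (by simpa using hb))⟩
      · rintro ⟨s, _, hmem, hch⟩
        have hs : s = [] := by
          cases s with
          | nil => rfl
          | cons a as => exact absurd ((hmem a).mp (by simp)) (by simp)
        subst hs
        simpa using beq_iff_eq.mpr hch
    · rw [pv_checkA_unfold_ne f l r hr]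
      constructor
      · rintro ⟨w, ⟨hwr, hwh⟩, hrec⟩
        have hcard : (r.filter (fun c => c ≠ w)).toFinset.card ≤ n :=
          Nat.lt_succ_iff.mp (lt_of_lt_of_le (pv_card_filter_ne_lt hwr) hc)
        obtain ⟨s', hnd', hmem', hch'⟩ := (ih _ hcard f (pvLast w)).mp hrec
        refine ⟨w :: s', ?_, ?_, hwh, hch'⟩
        · refine List.nodup_cons.mpr ⟨?_, hnd'⟩
          intro hws'
          have := (hmem' w).mp hws'
          simp [List.mem_filter] at this
        · intro x
          constructor
          · intro hx
            rcases List.mem_cons.mp hx with hx | hx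
            · subst hx; exact hwr
            · have := (hmem' x).mp hx
              simp only [List.mem_filter] at this
              exact this.1
          · intro hx
            by_cases hxw : x = w
            · subst hxw; exact List.mem_cons_self
            · exact List.mem_cons.mpr (Or.inr ((hmem' x).mpr (by simp [List.mem_filter, hx, hxw])))
      · rintro ⟨s, hnd, hmem, hch⟩
        cases s with
        | nil =>
          obtain ⟨a, ha⟩ := List.exists_mem_of_ne_nil r hr
          exact absurd ((hmem a).mpr ha) (by simp)
        | cons w s' =>
          obtain ⟨hwh, hch'⟩ := hch
          have hwr : w ∈ r := (hmem w).mp (by simp)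
          have hnd' := List.nodup_cons.mp hnd
          have hcard : (r.filter (fun c => c ≠ w)).toFinset.card ≤ n :=
            Nat.lt_succ_iff.mp (lt_of_lt_of_le (pv_card_filter_ne_lt hwr) hc)
          refine ⟨w, ⟨hwr, hwh⟩, (ih _ hcard f (pvLast w)).mpr ⟨s', hnd'.2, ?_, hch'⟩⟩
          intro x
          simp only [List.mem_filter, decide_eq_true_eq]
          constructor
          · intro hx
            refine ⟨(hmem x).mp (List.mem_cons.mpr (Or.inr hx)), ?_⟩
            intro hxw; subst hxw; exact hnd'.1 hx
          · rintro ⟨hxr, hxw⟩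
            rcases List.mem_cons.mp ((hmem x).mpr hxr) with h | h
            · exact absurd h hxw
            · exact h

-- membership in one BFS layer step
lemma pv_mem_step (fr : List (String × List String)) (c' : String) (s' : List String) :
    (c', s') ∈ pvStep fr ↔
      ∃ p ∈ fr, ∃ w ∈ p.2, pvHead w = p.1 ∧ c' = pvLast w ∧ s' = p.2.filter (fun x => x ≠ w) := by
  simp only [pvStep, PySem.Set.mem_ofList, List.mem_flatMap, List.mem_map, List.mem_filter,
    Prod.mk.injEq, beq_iff_eq]
  constructor
  · rintro ⟨p, hp, w, ⟨hw, hwh⟩, hc, hs⟩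
    exact ⟨p, hp, w, hw, hwh, hc.symm, hs.symm⟩
  · rintro ⟨p, hp, w, hw, hwh, hc, hs⟩
    exact ⟨p, hp, w, ⟨hw, hwh⟩, hc.symm, hs.symm⟩

lemma pv_layer_succ (init : List (String × List String)) (k : Nat) :
    (List.range (k + 1)).foldl (fun fr _ => pvStep fr) init
      = pvStep ((List.range k).foldl (fun fr _ => pvStep fr) init) := by
  simp [List.range_succ]

-- the k-th BFS layer is exactly the set of states reached by nodup k-word chains from l
lemma pv_layer_iff (k : Nat) (l : String) (S0 : List String) (c : String) (s : List String) :
    (c, s) ∈ (List.range k).foldl (fun fr _ => pvStep fr) [(l, S0)] ↔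
      ∃ used : List String, used.Nodup ∧ used.length = k ∧ (∀ x ∈ used, x ∈ S0) ∧
        s = S0.filter (fun x => x ∉ used) ∧ pvChains c l used := by
  induction k generalizing c s with
  | zero =>
    simp only [List.range_zero, List.foldl_nil, List.mem_singleton, Prod.mk.injEq]
    constructor
    · rintro ⟨hc, hs⟩
      exact ⟨[], by simp, rfl, by simp, by simp [hs], by simp [pvChains, hc]⟩
    · rintro ⟨used, _, hlen, _, hs, hch⟩
      have : used = [] := List.eq_nil_of_length_eq_zero hlen
      subst this
      exact ⟨hch.symm, by simpa using hs⟩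
  | succ k ih =>
    rw [pv_layer_succ, pv_mem_step]
    constructor
    · rintro ⟨p, hp, w, hw, hwh, hc, hs⟩
      obtain ⟨pc, ps⟩ := p
      obtain ⟨used, hnd, hlen, hsub, hps, hch⟩ := (ih pc ps).mp hp
      simp only at hw hwh hs
      subst hps
      have hwS0 : w ∈ S0 := (List.mem_filter.mp hw).1
      have hwused : w ∉ used := by
        have := (List.mem_filter.mp hw).2; simpa using this
      refine ⟨used ++ [w], ?_, by simp [hlen], ?_, ?_, ?_⟩
      · simp [List.nodup_append, hnd]
        intro a ha h
        subst h
        exact hwused ha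
      · intro x hx
        rcases List.mem_append.mp hx with h | h
        · exact hsub x h
        · simp at h; subst h; exact hwS0
      · rw [hs, List.filter_filter]
        apply List.filter_congr
        intro x _
        simp only [List.mem_append, List.mem_singleton]
        by_cases h1 : x ∈ used <;> by_cases h2 : x = w <;> simp [h1, h2]
      · subst hc
        exact (pvChains_snoc (pvLast w) l w used).mpr ⟨by rwa [hwh], rfl⟩
    · rintro ⟨used, hnd, hlen, hsub, hs, hch⟩
      rcases List.eq_nil_or_concat used with h | ⟨u', w, h⟩
      · subst h; simp at hlen
      · subst h
        simp only [List.concat_eq_append] at hnd hlen hsub hs hch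
        obtain ⟨hch', hwl⟩ := (pvChains_snoc c l w u').mp hch
        have hnd' : u'.Nodup := hnd.of_append_left
        have hwu' : w ∉ u' := fun hx => (List.disjoint_of_nodup_append hnd) hx (by simp)
        have hlen' : u'.length = k := by simpa using hlen
        refine ⟨(pvHead w, S0.filter (fun x => x ∉ u')), ?_, w, ?_, rfl, hwl.symm, ?_⟩
        · exact (ih _ _).mpr ⟨u', hnd', hlen', fun x hx => hsub x (by simp [hx]), rfl, hch'⟩
        · exact List.mem_filter.mpr ⟨hsub w (by simp), decide_eq_true hwu'⟩
        · rw [hs, List.filter_filter]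
          apply List.filter_congr
          intro x _
          simp only [List.mem_append, List.mem_singleton]
          by_cases h1 : x ∈ u' <;> by_cases h2 : x = w <;> simp [h1, h2]

-- B decides pvSpecSet on the deduped word list
lemma pv_B_iff (f l : String) (r : List String) :
    check_chain_alt f l r = true ↔ pvSpecSet f l (PySem.Set.ofList r) := by
  unfold check_chain_alt
  simp only [List.any_eq_true]
  have hnd : (PySem.Set.ofList r).Nodup := PySem.Set.nodup_ofList r
  constructor
  · rintro ⟨p, hp, hpf⟩
    obtain ⟨used, hund, hlen, hsub, _, hch⟩ :=
      (pv_layer_iff _ l (PySem.Set.ofList r) p.1 p.2).mp (by rwa [← Prod.mk.eta (p := p)] at hp)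
    have hperm : List.Perm used (PySem.Set.ofList r) :=
      (List.subperm_of_subset hund (fun x hx => hsub x hx)).perm_of_length_le (by omega)
    refine ⟨used, hund, fun x => ⟨fun hx => hsub x hx, fun hx => hperm.mem_iff.mpr hx⟩, ?_⟩
    have : p.1 = f := by simpa using hpf
    rwa [this] at hch
  · rintro ⟨s, hsnd, hmem, hch⟩
    have hsub : ∀ x ∈ s, x ∈ PySem.Set.ofList r := fun x hx => (hmem x).mp hx
    have hsub' : PySem.Set.ofList r ⊆ s := fun x hx => (hmem x).mpr hx
    have hperm : List.Perm s (PySem.Set.ofList r) :=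
      (List.subperm_of_subset hsnd (fun x hx => hsub x hx)).perm_of_length_le
        ((List.subperm_of_subset hnd hsub').length_le)
    refine ⟨(f, (PySem.Set.ofList r).filter (fun x => x ∉ s)), ?_, by simp⟩
    exact (pv_layer_iff _ l (PySem.Set.ofList r) f _).mpr
      ⟨s, hsnd, hperm.length_eq, hsub, rfl, hch⟩

lemma pv_specSet_ofList (f l : String) (r : List String) :
    pvSpecSet f l (PySem.Set.ofList r) ↔ pvSpecSet f l r := by
  unfold pvSpecSet
  constructor <;> rintro ⟨s, hnd, hmem, hch⟩ <;>
    exact ⟨s, hnd, fun x => by rw [hmem x, PySem.Set.mem_ofList], hch⟩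

theorem check_chain_spec : Claim_equal_check_chain := by
  intro first_char last_char remaining _hdom _hpre
  unfold Spec_check_chain
  rw [Bool.eq_iff_iff]
  rw [pv_A_iff remaining.toFinset.card remaining le_rfl first_char last_char]
  rw [pv_B_iff first_char last_char remaining]
  exact (pv_specSet_ofList first_char last_char remaining).symm
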